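-- pv_equiv track=rewrite | github.com/tanmayidev/dsa-solutions | freecodecamp/daily-code-challenge/2026-02-12.py | largest_difference
-- ===== SOURCE A (Python) =====
-- def largest_difference(skater1, skater2):
--     max_diff = float('-inf')
--     lap_number = -1
--
--     for i in range(len(skater1)):
--         diff = abs(skater1[i] - skater2[i])
--
--         if diff > max_diff:
--             max_diff = diff
--             lap_number = i + 1  # Lap numbers are 1-based
--
--     return lap_number
-- ===== SOURCE B (Python) =====
-- def largest_difference(skater1, skater2):
--     # Divide-and-conquer tournament: recursively find the argmax of the absolute
--     # lap differences on each half and combine, ties going to the earlier lap.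
--     def best(lo, hi):
--         # argmax of abs diff over laps [lo, hi); None if the range is empty
--         if hi - lo == 0:
--             return None
--         if hi - lo == 1:
--             return (abs(skater1[lo] - skater2[lo]), lo)
--         mid = (lo + hi) // 2
--         left = best(lo, mid)
--         right = best(mid, hi)
--         return left if left[0] >= right[0] else right
--
--     res = best(0, len(skater1))
--     return res[1] + 1 if res is not None else -1
-- ===== Notes on version B (the rewrite author's own statement) =====
-- stated objective: alternative
-- what changed: Replaces A's single left-to-right running-max loop with a divide-and-conquer tournament: recursively compute the argmax of the absolute differences on each half of the index range and combine with a left-biased comparison (ties keep the earlier lap, matching A's strict-> update rule).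
import Mathlib
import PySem

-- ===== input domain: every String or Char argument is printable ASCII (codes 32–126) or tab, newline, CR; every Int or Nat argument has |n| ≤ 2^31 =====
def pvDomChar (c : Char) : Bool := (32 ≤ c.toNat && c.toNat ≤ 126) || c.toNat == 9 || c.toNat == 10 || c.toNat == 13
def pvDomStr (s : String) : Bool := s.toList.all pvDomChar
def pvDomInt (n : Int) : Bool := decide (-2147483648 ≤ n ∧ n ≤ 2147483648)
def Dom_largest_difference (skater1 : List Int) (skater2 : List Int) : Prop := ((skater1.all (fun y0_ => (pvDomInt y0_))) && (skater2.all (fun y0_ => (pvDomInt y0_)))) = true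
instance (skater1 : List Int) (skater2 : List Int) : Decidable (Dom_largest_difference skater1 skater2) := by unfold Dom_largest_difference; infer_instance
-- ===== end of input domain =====

-- B replaces A's single running-max loop by a divide-and-conquer tournament over the
-- index range (left-biased combine = earlier lap wins ties); objective: alternative, same O(n).

-- ===== PORT A =====
-- float('-inf') is modeled as `none : Option Int` (strictly below every Int; exact here,
-- since every later candidate is an Int). skater2[i] out of range = IndexError in Python,
-- excluded by Pre_; pyGetD's default 0 is never consulted inside Pre_.
def largest_difference (skater1 : List Int) (skater2 : List Int) : Int :=
  (((PySem.List.pyRange 0 (skater1.length : Int) 1).foldl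
    (fun (acc : Option Int × Int) i =>
      let diff := |PySem.List.pyGetD skater1 i 0 - PySem.List.pyGetD skater2 i 0|
      if (match acc.1 with | none => true | some m => decide (m < diff)) = true
      then (some diff, i + 1) else acc)
    (none, -1)) : Option Int × Int).2

-- ===== PORT B =====
-- Source B's inner `best(lo, hi)`: argmax of abs diff over laps [lo, hi), None iff empty.
-- When hi - lo ≥ 2 both recursive results are some (each half is nonempty), so the
-- Python line `left if left[0] >= right[0] else right` never sees None; the Lean
-- `| _, _ => none` arm is that dead branch.
def pvBest (s1 s2 : List Int) (lo hi : Nat) : Option (Int × Nat) :=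
  if hi - lo = 0 then none
  else if hi - lo = 1 then
    some (|PySem.List.pyGetD s1 (lo : Int) 0 - PySem.List.pyGetD s2 (lo : Int) 0|, lo)
  else
    -- Python's (lo + hi) // 2 on nonnegative ints = Nat division (exact here)
    let mid := (lo + hi) / 2
    match pvBest s1 s2 lo mid, pvBest s1 s2 mid hi with
    | some l, some r => if l.1 ≥ r.1 then some l else some r
    | _, _ => none
termination_by hi - lo
decreasing_by all_goals omega

def largest_difference_alt (skater1 : List Int) (skater2 : List Int) : Int :=
  match pvBest skater1 skater2 0 skater1.length with
  | some res => (res.2 : Int) + 1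
  | none => -1

-- ===== PRECONDITION & SPEC =====
-- Pre_ excludes exactly the inputs where Python A raises IndexError: skater2 shorter than skater1.
def Pre_largest_difference (skater1 : List Int) (skater2 : List Int) : Prop :=
  skater1.length ≤ skater2.length
instance (skater1 : List Int) (skater2 : List Int) : Decidable (Pre_largest_difference skater1 skater2) := by unfold Pre_largest_difference; infer_instance
def pvWitness_largest_difference : List Int × List Int := ([1, 5, 2], [2, 2, 9])
def Spec_largest_difference (skater1 : List Int) (skater2 : List Int) (out : Int) : Prop := out = largest_difference_alt skater1 skater2
instance (skater1 : List Int) (skater2 : List Int) (out : Int) : Decidable (Spec_largest_difference skater1 skater2 out) := by unfold Spec_largest_difference; infer_instance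

-- ===== CLAIM (what is proved, stated in full; the proofs are below) =====
def Claim_equal_largest_difference : Prop := ∀ (skater1 : List Int) (skater2 : List Int), Dom_largest_difference skater1 skater2 → Pre_largest_difference skater1 skater2 → Spec_largest_difference skater1 skater2 (largest_difference skater1 skater2)

-- ===== LEMMAS AND PROOFS =====

-- diff at Nat index k (what both ports compute after pyGetD_natCast)
def pvDiff (s1 s2 : List Int) (k : Nat) : Int := |s1.getD k 0 - s2.getD k 0|

-- left-biased combine of optional (value, index) candidates — the tournament merge
def pvComb : Option (Int × Nat) → Option (Int × Nat) → Option (Int × Nat)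
  | none, r => r
  | l, none => l
  | some l, some r => if l.1 ≥ r.1 then some l else some r

theorem pvComb_assoc (a b c : Option (Int × Nat)) :
    pvComb (pvComb a b) c = pvComb a (pvComb b c) := by
  rcases a with _ | ⟨da, ja⟩ <;> rcases b with _ | ⟨db, jb⟩ <;> rcases c with _ | ⟨dc, jc⟩ <;>
    simp only [pvComb] <;> try rfl
  all_goals split_ifs <;> first
    | rfl
    | (dsimp only; (try split_ifs) <;> first | rfl | (exfalso; omega))

-- the linear reference: fold the candidates of [lo, lo+n) left-to-right through pvComb
def pvLin (s1 s2 : List Int) (lo n : Nat) : Option (Int × Nat) :=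
  (List.range' lo n).foldl (fun acc k => pvComb acc (some (pvDiff s1 s2 k, k))) none

theorem pvLin_fold_acc (s1 s2 : List Int) (l : List Nat) :
    ∀ acc : Option (Int × Nat),
      l.foldl (fun acc k => pvComb acc (some (pvDiff s1 s2 k, k))) acc
        = pvComb acc (l.foldl (fun acc k => pvComb acc (some (pvDiff s1 s2 k, k))) none) := by
  induction l with
  | nil => intro acc; cases acc <;> simp [pvComb]
  | cons x t ih =>
    intro acc
    simp only [List.foldl_cons]
    rw [ih (pvComb acc (some (pvDiff s1 s2 x, x))), ih (pvComb none (some (pvDiff s1 s2 x, x))),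
        pvComb_assoc]
    rfl

theorem pvLin_append (s1 s2 : List Int) (lo n m : Nat) :
    pvLin s1 s2 lo (n + m) = pvComb (pvLin s1 s2 lo n) (pvLin s1 s2 (lo + n) m) := by
  unfold pvLin
  rw [← List.range'_append_1, List.foldl_append, pvLin_fold_acc]

theorem pvLin_isSome (s1 s2 : List Int) (lo n : Nat) (h : 0 < n) :
    ∃ p, pvLin s1 s2 lo n = some p := by
  induction n generalizing lo with
  | zero => omega
  | succ m ih =>
    rcases Nat.eq_zero_or_pos m with hm | hm
    · subst hm; exact ⟨(pvDiff s1 s2 lo, lo), by simp [pvLin, List.range', pvComb]⟩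
    · obtain ⟨p, hp⟩ := ih (lo + 1) hm
      have h1 : pvLin s1 s2 lo 1 = some (pvDiff s1 s2 lo, lo) := by
        simp [pvLin, List.range', pvComb]
      have heq : pvLin s1 s2 lo (m + 1)
          = pvComb (some (pvDiff s1 s2 lo, lo)) (some p) := by
        rw [show m + 1 = 1 + m by omega, pvLin_append, h1, hp]
      by_cases hc : p.1 ≤ pvDiff s1 s2 lo
      · exact ⟨_, by rw [heq]; simp only [pvComb]; rw [if_pos hc]⟩
      · exact ⟨_, by rw [heq]; simp only [pvComb]; rw [if_neg hc]⟩

-- pvBest computes the linear reference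
theorem pvBest_eq_pvLin (s1 s2 : List Int) (lo hi : Nat) (hle : lo ≤ hi) :
    pvBest s1 s2 lo hi = pvLin s1 s2 lo (hi - lo) := by
  generalize hn : hi - lo = n
  induction n using Nat.strong_induction_on generalizing lo hi with
  | _ n ih =>
    rw [pvBest]
    rcases Nat.eq_zero_or_pos n with h0 | h0
    · subst h0; simp [hn, pvLin, List.range']
    rcases Nat.lt_or_ge n 2 with h1 | h2
    · have : n = 1 := by omega
      subst this
      simp only [hn]
      simp [pvLin, List.range', pvComb, pvDiff, PySem.List.pyGetD_natCast]
    · have hne0 : ¬ hi - lo = 0 := by omega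
      have hne1 : ¬ hi - lo = 1 := by omega
      simp only [hne0, hne1, if_false]
      set mid := (lo + hi) / 2 with hmid
      have hlt1 : lo < mid := by omega
      have hlt2 : mid < hi := by omega
      rw [ih (mid - lo) (by omega) lo mid (by omega) rfl,
          ih (hi - mid) (by omega) mid hi (by omega) rfl]
      obtain ⟨l, hl⟩ := pvLin_isSome s1 s2 lo (mid - lo) (by omega)
      obtain ⟨r, hr⟩ := pvLin_isSome s1 s2 mid (hi - mid) (by omega)
      have : pvLin s1 s2 lo (hi - lo) = pvComb (pvLin s1 s2 lo (mid - lo)) (pvLin s1 s2 mid (hi - mid)) := by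
        rw [show hi - lo = (mid - lo) + (hi - mid) by omega, pvLin_append,
            show lo + (mid - lo) = mid by omega]
      rw [hn] at this
      rw [this, hl, hr]
      rfl

-- encode the linear reference state as A's loop state
def pvEnc : Option (Int × Nat) → Option Int × Int
  | none => (none, -1)
  | some (d, j) => (some d, (j : Int) + 1)

-- A's loop over any list of Nat indices simulates the pvComb fold
theorem pvFoldA_enc (s1 s2 : List Int) (l : List Nat) :
    ∀ acc : Option (Int × Nat),
      l.foldl (fun (a : Option Int × Int) (k : Nat) =>
          let diff := pvDiff s1 s2 k
          if (match a.1 with | none => true | some m => decide (m < diff)) = true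
          then (some diff, (k : Int) + 1) else a) (pvEnc acc)
        = pvEnc (l.foldl (fun acc k => pvComb acc (some (pvDiff s1 s2 k, k))) acc) := by
  induction l with
  | nil => intro acc; rfl
  | cons x t ih =>
    intro acc
    simp only [List.foldl_cons]
    have hstep : (let diff := pvDiff s1 s2 x
        if (match (pvEnc acc).1 with | none => true | some m => decide (m < diff)) = true
        then (some diff, (x : Int) + 1) else pvEnc acc)
        = pvEnc (pvComb acc (some (pvDiff s1 s2 x, x))) := by
      cases acc with
      | none => rfl
      | some p =>
        obtain ⟨d, j⟩ := p
        by_cases h : d < pvDiff s1 s2 x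
        · simp only [pvEnc, pvComb, if_neg (not_le.mpr h)]
          simp [h]
        · simp only [pvEnc, pvComb, if_pos (not_lt.mp h)]
          simp [h]
    rw [hstep, ih]

theorem largest_difference_spec : Claim_equal_largest_difference := by
  intro s1 s2 _ _
  unfold Spec_largest_difference largest_difference largest_difference_alt
  -- turn A's pyRange/Int loop into the Nat-indexed loop
  have hrange : PySem.List.pyRange 0 (s1.length : Int) 1
      = (List.range s1.length).map (fun k : Nat => (k : Int)) := by
    rw [PySem.List.pyRange_one]
    simp
  rw [hrange, List.foldl_map]
  have hbody : (fun (acc : Option Int × Int) (k : Nat) =>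
      let diff := |PySem.List.pyGetD s1 (k : Int) 0 - PySem.List.pyGetD s2 (k : Int) 0|
      if (match acc.1 with | none => true | some m => decide (m < diff)) = true
      then (some diff, (k : Int) + 1) else acc)
      = (fun (a : Option Int × Int) (k : Nat) =>
          let diff := pvDiff s1 s2 k
          if (match a.1 with | none => true | some m => decide (m < diff)) = true
          then (some diff, (k : Int) + 1) else a) := by
    funext a k
    simp [pvDiff, PySem.List.pyGetD_natCast]
  rw [show ((none, -1) : Option Int × Int) = pvEnc none from rfl]
  rw [hbody, pvFoldA_enc s1 s2 (List.range s1.length) none]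
  rw [pvBest_eq_pvLin s1 s2 0 s1.length (Nat.zero_le _)]
  unfold pvLin
  rw [Nat.sub_zero, ← List.range_eq_range']
  cases hfin : (List.range s1.length).foldl (fun acc k => pvComb acc (some (pvDiff s1 s2 k, k))) none with
  | none => rfl
  | some p => obtain ⟨d, j⟩ := p; rfl

-- ===== VERDICT (by name: the statement is the Claim_ definition above) =====
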